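-- pv_equiv track=rewrite | github.com/zhoujoetan/TowersOfHanoi | Hanoi.py | SA2TA
-- ===== SOURCE A (Python) =====
-- def SA2TA(SA):
--     '''convert hanoi puzzle SA format to Tenary Address format.'''
--     if SA == []:
--         return []
--     TA = [0] * 3
--     length = len(SA)
--     for i in range(length):
--         for j in range(3):
--             TA[j] += pow(2, length - i - 1)
--         TA[SA[i]] -= pow(2, length - i - 1)
--     return TA
-- ===== SOURCE B (Python) =====
-- def SA2TA(SA):
--     '''convert hanoi puzzle SA format to Tenary Address format.'''
--     if SA == []:
--         return []
--     length = len(SA)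
--     total = (1 << length) - 1
--     buckets = [[], [], []]
--     for i, s in enumerate(SA):
--         buckets[s].append(length - i - 1)
--     return [total - sum(1 << w for w in bucket) for bucket in buckets]
-- ===== Notes on version B (the rewrite author's own statement) =====
-- stated objective: alternative
-- what changed: B first groups the bit-position exponents per peg into three buckets in one pass, then computes each peg's address as total minus the bucket's power-of-two sum, replacing A's interleaved add-2^k-to-all-three-pegs-then-subtract-one mutation loop.
import Mathlib
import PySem

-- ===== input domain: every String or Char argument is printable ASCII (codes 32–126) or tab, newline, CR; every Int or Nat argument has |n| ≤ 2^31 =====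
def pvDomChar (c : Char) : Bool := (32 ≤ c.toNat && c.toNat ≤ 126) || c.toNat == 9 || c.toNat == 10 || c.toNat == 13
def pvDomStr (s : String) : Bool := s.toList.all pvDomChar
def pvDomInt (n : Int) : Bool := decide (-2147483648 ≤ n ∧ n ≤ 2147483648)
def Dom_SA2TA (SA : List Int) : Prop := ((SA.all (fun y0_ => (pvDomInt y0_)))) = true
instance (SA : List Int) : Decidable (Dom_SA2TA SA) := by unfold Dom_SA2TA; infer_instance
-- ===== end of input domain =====

-- B groups the exponents per peg first (buckets) and then reduces each bucket once,
-- instead of A's interleaved add-to-all-three-then-subtract-one loop; objective: alternative decomposition.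

-- ===== PORT A =====
-- 'pow(2, length - i - 1)': inside the loop 0 ≤ i < length, so the exponent is ≥ 0 and '.toNat' is exact.
def SA2TA (SA : List Int) : List Int :=
  if SA = [] then []
  else
    let TA : List Int := [0, 0, 0]
    let length : Int := PySem.List.len SA
    (PySem.List.pyRange 0 length 1).foldl (fun TA i =>
      let TA := (PySem.List.pyRange 0 3 1).foldl (fun TA j =>
        PySem.List.pySetD TA j (PySem.List.pyGetD TA j 0 + 2 ^ (length - i - 1).toNat)) TA
      let s := PySem.List.pyGetD SA i 0
      PySem.List.pySetD TA s (PySem.List.pyGetD TA s 0 - 2 ^ (length - i - 1).toNat)) TA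

-- ===== PORT B =====
-- '1 << length' and '1 << w': the shift amounts are ≥ 0 (length = len(SA), w = length-i-1 with i < length),
-- so the Nat shift ('.toNat' on w) is exact.
def SA2TA_alt (SA : List Int) : List Int :=
  if SA = [] then []
  else
    let length : Int := PySem.List.len SA
    let total : Int := ((1 : Int) <<< SA.length) - 1
    let buckets : List (List Int) :=
      (PySem.List.enumerate SA 0).foldl (fun b p =>
        PySem.List.pySetD b p.2 (PySem.List.pyGetD b p.2 [] ++ [length - p.1 - 1]))
        [[], [], []]
    buckets.map (fun bucket => total - (bucket.map (fun w => (1 : Int) <<< w.toNat)).sum)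

-- ===== PRECONDITION & SPEC =====
-- Pre_ excludes exactly the inputs where Python A raises IndexError on TA[SA[i]]
-- (an element outside -3..2); Python's negative indices -3..-1 are admitted (they wrap).
def Pre_SA2TA (SA : List Int) : Prop := ∀ x ∈ SA, -3 ≤ x ∧ x < 3
instance (SA : List Int) : Decidable (Pre_SA2TA SA) := by unfold Pre_SA2TA; infer_instance
def pvWitness_SA2TA : List Int := [0, 2, -1, 1, 0]

def Spec_SA2TA (SA : List Int) (out : List Int) : Prop := out = SA2TA_alt SA
instance (SA : List Int) (out : List Int) : Decidable (Spec_SA2TA SA out) := by unfold Spec_SA2TA; infer_instance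

-- ===== CLAIM (what is proved, stated in full; the proofs are below) =====
def Claim_equal_SA2TA : Prop := ∀ (SA : List Int), Dom_SA2TA SA → Pre_SA2TA SA → Spec_SA2TA SA (SA2TA SA)

-- ===== LEMMAS AND PROOFS =====

-- Per-peg subtraction sums: element at position i (exponent = length of the rest) classified by wrapped peg.
def pvSubs : List Int → Int × Int × Int
  | [] => (0, 0, 0)
  | s :: t =>
    let p : Int := 2 ^ t.length
    let x := pvSubs t
    if s = 0 ∨ s = -3 then (x.1 + p, x.2.1, x.2.2)
    else if s = 1 ∨ s = -2 then (x.1, x.2.1 + p, x.2.2)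
    else (x.1, x.2.1, x.2.2 + p)

lemma innerFold (a b c p : Int) : (PySem.List.pyRange 0 3 1).foldl
    (fun TA j => PySem.List.pySetD TA j (PySem.List.pyGetD TA j 0 + p)) [a,b,c] = [a+p,b+p,c+p] := rfl

lemma A_loop (suf : List Int) : ∀ (pre : List Int), (∀ x ∈ suf, -3 ≤ x ∧ x < 3) → ∀ (a b c : Int),
  (PySem.List.pyRange (pre.length : Int) (((pre.length + suf.length : Nat) : Int)) 1).foldl
    (fun TA i =>
      let TA := (PySem.List.pyRange 0 3 1).foldl (fun TA j =>
        PySem.List.pySetD TA j (PySem.List.pyGetD TA j 0 + 2 ^ (((pre.length + suf.length : Nat) : Int) - i - 1).toNat)) TA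
      let s := PySem.List.pyGetD (pre ++ suf) i 0
      PySem.List.pySetD TA s (PySem.List.pyGetD TA s 0 - 2 ^ ((((pre.length + suf.length : Nat) : Int)) - i - 1).toNat))
    [a, b, c]
  = [a + (2 ^ suf.length - 1) - (pvSubs suf).1,
     b + (2 ^ suf.length - 1) - (pvSubs suf).2.1,
     c + (2 ^ suf.length - 1) - (pvSubs suf).2.2] := by
  induction suf with
  | nil =>
    intro pre _ a b c
    rw [PySem.List.pyRange_one_eq_nil (a := (pre.length : Int)) (by simp)]
    simp [pvSubs]
  | cons s t ih =>
    intro pre h a b c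
    obtain ⟨h1, h2⟩ := h s (List.mem_cons_self)
    have ht : ∀ x ∈ t, -3 ≤ x ∧ x < 3 := fun x hx => h x (List.mem_cons_of_mem _ hx)
    rw [PySem.List.pyRange_one_cons (a := (pre.length : Int))
      (by simp only [List.length_cons]; push_cast; omega)]
    rw [List.foldl_cons]
    have hexp : ((pre.length + (s :: t).length : Nat) : Int) - (pre.length : Int) - 1 = ((t.length : Nat) : Int) := by
      simp only [List.length_cons]; push_cast; omega
    have hget : PySem.List.pyGetD (pre ++ s :: t) (pre.length : Int) 0 = s := by
      simp [PySem.List.pyGetD]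
    simp only [hexp, hget, Int.toNat_natCast, innerFold]
    have ih' := ih (pre ++ [s]) ht
    have hK : (((pre ++ [s]).length : Nat) : Int) = (pre.length : Int) + 1 := by simp
    have hL : ((pre ++ [s]).length + t.length : Nat) = (pre.length + (s :: t).length : Nat) := by
      simp; omega
    rw [hL, hK, List.append_assoc, List.singleton_append] at ih'
    interval_cases s
    · rw [show PySem.List.pySetD [a+2^t.length, b+2^t.length, c+2^t.length] (-3)
          (PySem.List.pyGetD [a+2^t.length, b+2^t.length, c+2^t.length] (-3) 0 - 2^t.length)
          = [a+2^t.length-2^t.length, b+2^t.length, c+2^t.length] from rfl, ih']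
      simp [pvSubs, pow_succ]
      refine ⟨by ring, by ring, by ring⟩
    · rw [show PySem.List.pySetD [a+2^t.length, b+2^t.length, c+2^t.length] (-2)
          (PySem.List.pyGetD [a+2^t.length, b+2^t.length, c+2^t.length] (-2) 0 - 2^t.length)
          = [a+2^t.length, b+2^t.length-2^t.length, c+2^t.length] from rfl, ih']
      simp [pvSubs, pow_succ]
      refine ⟨by ring, by ring, by ring⟩
    · rw [show PySem.List.pySetD [a+2^t.length, b+2^t.length, c+2^t.length] (-1)
          (PySem.List.pyGetD [a+2^t.length, b+2^t.length, c+2^t.length] (-1) 0 - 2^t.length)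
          = [a+2^t.length, b+2^t.length, c+2^t.length-2^t.length] from rfl, ih']
      simp [pvSubs, pow_succ]
      refine ⟨by ring, by ring, by ring⟩
    · rw [show PySem.List.pySetD [a+2^t.length, b+2^t.length, c+2^t.length] (0)
          (PySem.List.pyGetD [a+2^t.length, b+2^t.length, c+2^t.length] (0) 0 - 2^t.length)
          = [a+2^t.length-2^t.length, b+2^t.length, c+2^t.length] from rfl, ih']
      simp [pvSubs, pow_succ]
      refine ⟨by ring, by ring, by ring⟩
    · rw [show PySem.List.pySetD [a+2^t.length, b+2^t.length, c+2^t.length] (1)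
          (PySem.List.pyGetD [a+2^t.length, b+2^t.length, c+2^t.length] (1) 0 - 2^t.length)
          = [a+2^t.length, b+2^t.length-2^t.length, c+2^t.length] from rfl, ih']
      simp [pvSubs, pow_succ]
      refine ⟨by ring, by ring, by ring⟩
    · rw [show PySem.List.pySetD [a+2^t.length, b+2^t.length, c+2^t.length] (2)
          (PySem.List.pyGetD [a+2^t.length, b+2^t.length, c+2^t.length] (2) 0 - 2^t.length)
          = [a+2^t.length, b+2^t.length, c+2^t.length-2^t.length] from rfl, ih']
      simp [pvSubs, pow_succ]
      refine ⟨by ring, by ring, by ring⟩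

-- Per-peg exponent lists, as B's buckets collect them.
def pvWl : List Int → List Int × List Int × List Int
  | [] => ([], [], [])
  | s :: t =>
    let w : Int := (t.length : Int)
    let x := pvWl t
    if s = 0 ∨ s = -3 then (w :: x.1, x.2.1, x.2.2)
    else if s = 1 ∨ s = -2 then (x.1, w :: x.2.1, x.2.2)
    else (x.1, x.2.1, w :: x.2.2)

lemma pvWl_sum (l : List Int) :
    ((pvWl l).1.map (fun w => (1:Int) <<< w.toNat)).sum = (pvSubs l).1 ∧
    ((pvWl l).2.1.map (fun w => (1:Int) <<< w.toNat)).sum = (pvSubs l).2.1 ∧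
    ((pvWl l).2.2.map (fun w => (1:Int) <<< w.toNat)).sum = (pvSubs l).2.2 := by
  induction l with
  | nil => simp [pvWl, pvSubs]
  | cons s t ih =>
    obtain ⟨i1, i2, i3⟩ := ih
    have hsh : (1:Int) <<< ((((t.length : Int)).toNat : Nat) : Int) = 2 ^ t.length := by
      simp [Int.shiftLeft_eq_mul_pow]
    simp only [pvWl, pvSubs]
    split_ifs <;>
      simp only [List.map_cons, List.sum_cons, hsh, i1, i2, i3] <;>
      refine ⟨?_, ?_, ?_⟩ <;> first | trivial | ring

lemma B_loop (suf : List Int) : ∀ (pre : List Int), (∀ x ∈ suf, -3 ≤ x ∧ x < 3) → ∀ (u v w : List Int),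
  (PySem.List.enumerate suf ((pre.length : Nat) : Int)).foldl
    (fun b p => PySem.List.pySetD b p.2
      (PySem.List.pyGetD b p.2 [] ++ [((pre.length + suf.length : Nat) : Int) - p.1 - 1]))
    [u, v, w]
  = [u ++ (pvWl suf).1, v ++ (pvWl suf).2.1, w ++ (pvWl suf).2.2] := by
  induction suf with
  | nil =>
    intro pre _ u v w
    simp [PySem.List.enumerate_nil, pvWl]
  | cons s t ih =>
    intro pre h u v w
    obtain ⟨h1, h2⟩ := h s (List.mem_cons_self)
    have ht : ∀ x ∈ t, -3 ≤ x ∧ x < 3 := fun x hx => h x (List.mem_cons_of_mem _ hx)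
    rw [PySem.List.enumerate_cons, List.foldl_cons]
    have hexp : ((pre.length + (s :: t).length : Nat) : Int) - ((pre.length : Nat) : Int) - 1 = (t.length : Int) := by
      simp only [List.length_cons]; push_cast; omega
    simp only [hexp]
    have ih' := ih (pre ++ [s]) ht
    have hK : (((pre ++ [s]).length : Nat) : Int) = ((pre.length : Nat) : Int) + 1 := by simp
    have hL : ((pre ++ [s]).length + t.length : Nat) = (pre.length + (s :: t).length : Nat) := by
      simp; omega
    rw [hL, hK] at ih'
    interval_cases s
    · rw [show PySem.List.pySetD [u, v, w] (-3)
          (PySem.List.pyGetD [u, v, w] (-3) [] ++ [(t.length : Int)]) = [u ++ [(t.length : Int)], v, w] from rfl, ih']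
      simp [pvWl]
    · rw [show PySem.List.pySetD [u, v, w] (-2)
          (PySem.List.pyGetD [u, v, w] (-2) [] ++ [(t.length : Int)]) = [u, v ++ [(t.length : Int)], w] from rfl, ih']
      simp [pvWl]
    · rw [show PySem.List.pySetD [u, v, w] (-1)
          (PySem.List.pyGetD [u, v, w] (-1) [] ++ [(t.length : Int)]) = [u, v, w ++ [(t.length : Int)]] from rfl, ih']
      simp [pvWl]
    · rw [show PySem.List.pySetD [u, v, w] (0)
          (PySem.List.pyGetD [u, v, w] (0) [] ++ [(t.length : Int)]) = [u ++ [(t.length : Int)], v, w] from rfl, ih']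
      simp [pvWl]
    · rw [show PySem.List.pySetD [u, v, w] (1)
          (PySem.List.pyGetD [u, v, w] (1) [] ++ [(t.length : Int)]) = [u, v ++ [(t.length : Int)], w] from rfl, ih']
      simp [pvWl]
    · rw [show PySem.List.pySetD [u, v, w] (2)
          (PySem.List.pyGetD [u, v, w] (2) [] ++ [(t.length : Int)]) = [u, v, w ++ [(t.length : Int)]] from rfl, ih']
      simp [pvWl]

-- ===== VERDICT (by name: the statement is the Claim_ definition above) =====
theorem SA2TA_spec : Claim_equal_SA2TA := by
  unfold Claim_equal_SA2TA
  intro SA _ hpre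
  unfold Spec_SA2TA
  by_cases hnil : SA = []
  · subst hnil; rfl
  · have hA := A_loop SA [] hpre 0 0 0
    have hB := B_loop SA [] hpre [] [] []
    simp only [List.length_nil, Nat.cast_zero, Nat.zero_add, List.nil_append] at hA hB
    obtain ⟨w1, w2, w3⟩ := pvWl_sum SA
    have htot : ((1:Int) <<< SA.length) - 1 = 2 ^ SA.length - 1 := by
      rw [Int.shiftLeft_eq]; ring
    simp only [SA2TA, SA2TA_alt, if_neg hnil, PySem.List.len_eq]
    rw [hA, hB]
    simp only [List.map_cons, List.map_nil, w1, w2, w3, htot]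
    norm_num
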